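-- pv_equiv track=rewrite | github.com/Ravi7035/LeetCode | 3847-find-the-score-difference-in-a-game/3847-find-the-score-difference-in-a-game.py | scoreDifference
-- ===== SOURCE A (Python) =====
-- def scoreDifference(nums):
--     player1_score=0
--     player2_score=0
--     turn=1
--
--     for i,n in enumerate(nums):
--
--         if nums[i]%2!=0:
--             turn=2 if turn==1 else 1
--
--         if (i+1)%6==0:
--             turn=2 if turn==1 else 1
--
--         if turn==1:
--             player1_score+=nums[i]
--         else:
--             player2_score+=nums[i]
--
--     return player1_score-player2_score
-- ===== SOURCE B (Python) =====
-- def scoreDifference(nums):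
--     # Pass 1: turn-parity bit after each index (0 = player 1's turn took nums[i]).
--     pars = []
--     par = 0
--     for i, n in enumerate(nums):
--         par ^= (n % 2) ^ (1 if (i + 1) % 6 == 0 else 0)
--         pars.append(par)
--     # Pass 2: diff = total - 2 * (sum of player 2's elements).
--     return sum(nums) - 2 * sum(n for n, p in zip(nums, pars) if p)
-- ===== Notes on version B (the rewrite author's own statement) =====
-- stated objective: alternative
-- what changed: Replaces the single pass with a toggled turn flag and two score accumulators by two staged passes: pass 1 builds the per-index turn-parity bit list via XOR of value parity and the 6-boundary flip, pass 2 returns sum(nums) - 2*(sum of elements at parity-1 positions), using the identity diff = total - 2*loser_sum.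
import Mathlib
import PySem

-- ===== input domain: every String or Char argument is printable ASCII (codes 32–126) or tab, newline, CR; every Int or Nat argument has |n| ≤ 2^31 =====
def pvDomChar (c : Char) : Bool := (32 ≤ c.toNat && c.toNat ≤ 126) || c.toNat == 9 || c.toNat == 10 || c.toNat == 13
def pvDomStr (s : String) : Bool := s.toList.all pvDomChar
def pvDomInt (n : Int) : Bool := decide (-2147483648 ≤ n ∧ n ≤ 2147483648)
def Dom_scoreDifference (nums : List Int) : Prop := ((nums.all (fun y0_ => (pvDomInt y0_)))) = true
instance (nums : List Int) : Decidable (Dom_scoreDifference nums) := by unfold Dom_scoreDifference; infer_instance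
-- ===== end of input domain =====

-- B: two staged passes — first a turn-parity bit list built with XOR, then diff = total − 2·(player-2 sum); alternative decomposition.
-- ===== PORT A =====
def aLoop : List Int → Nat → Int → Int → Int → Int
  | [], _, p1, p2, _ => p1 - p2
  | n :: t, i, p1, p2, turn =>
    let turn1 := if PySem.Int.mod n 2 ≠ 0 then (if turn = 1 then 2 else 1) else turn
    let turn2 := if (i + 1) % 6 = 0 then (if turn1 = 1 then 2 else 1) else turn1
    if turn2 = 1 then aLoop t (i + 1) (p1 + n) p2 turn2
    else aLoop t (i + 1) p1 (p2 + n) turn2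

def scoreDifference (nums : List Int) : Int := aLoop nums 0 0 0 1

-- ===== PORT B =====
-- pass 1: the parity bit after each index (0 = player 1 took nums[i])
def bPars : List Int → Nat → Nat → List Nat
  | [], _, _ => []
  | n :: t, i, par =>
    let par' := par ^^^ ((PySem.Int.mod n 2).toNat ^^^ (if (i + 1) % 6 = 0 then 1 else 0))
    par' :: bPars t (i + 1) par'

def scoreDifference_alt (nums : List Int) : Int :=
  let pars := bPars nums 0 0
  nums.sum - 2 * (((nums.zip pars).filter (fun p => p.2 != 0)).map Prod.fst).sum

-- ===== PRECONDITION & SPEC =====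
def Spec_scoreDifference (nums : List Int) (out : Int) : Prop := out = scoreDifference_alt nums
instance (nums : List Int) (out : Int) : Decidable (Spec_scoreDifference nums out) := by unfold Spec_scoreDifference; infer_instance

-- ===== CLAIM (what is proved, stated in full; the proofs are below) =====
def Claim_equal_scoreDifference : Prop := ∀ (nums : List Int), Dom_scoreDifference nums → Spec_scoreDifference nums (scoreDifference nums)

-- ===== LEMMAS AND PROOFS =====
theorem loop_eq (l : List Int) : ∀ (i : Nat) (p1 p2 : Int) (par : Nat), par ≤ 1 →
    aLoop l i p1 p2 (if par = 0 then 1 else 2) =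
      p1 - p2 + l.sum
        - 2 * (((l.zip (bPars l i par)).filter (fun p => p.2 != 0)).map Prod.fst).sum := by
  induction l with
  | nil =>
    intro i p1 p2 par _
    simp [aLoop, bPars]
  | cons n t ih =>
    intro i p1 p2 par hpar
    have hm : (PySem.Int.mod n 2).toNat = 0 ∨ (PySem.Int.mod n 2).toNat = 1 := by
      have h0 := PySem.Int.mod_nonneg n (b := 2) (by omega)
      have h1 := PySem.Int.mod_lt n (b := 2) (by omega)
      omega
    have hm' : PySem.Int.mod n 2 = 0 ∨ PySem.Int.mod n 2 = 1 := by
      have h0 := PySem.Int.mod_nonneg n (b := 2) (by omega)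
      omega
    simp only [aLoop, bPars, List.zip_cons_cons, List.filter_cons, List.sum_cons]
    rcases hm' with h | h <;>
      rcases (by omega : par = 0 ∨ par = 1) with hp | hp <;>
      subst hp <;>
      by_cases h6 : (i + 1) % 6 = 0 <;>
      simp only [h, h6, Int.toNat_zero, Int.toNat_one, if_true, if_false, Nat.reduceXor] <;>
      simp only [show (0:Int) ≠ 0 ↔ False from by simp, show (1:Int) ≠ 0 ↔ True from by simp] <;>
      norm_num <;>
      (have h1 := ih (i + 1) (p1 + n) p2 0 (by omega);
       have h2 := ih (i + 1) p1 (p2 + n) 1 (by omega);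
       norm_num at h1 h2;
       omega)

-- ===== VERDICT (by name: the statement is the Claim_ definition above) =====
theorem scoreDifference_spec : Claim_equal_scoreDifference := by
  intro nums _
  unfold Spec_scoreDifference scoreDifference scoreDifference_alt
  have := loop_eq nums 0 0 0 0 (by omega)
  simpa using this
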